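-- pv_equiv track=rewrite | github.com/DHRUV6029/Google-Msft_InterviewQues | Google/message_within_10_secs.py | get_exclusive_ts
-- ===== SOURCE A (Python) =====
-- import bisect
--
-- def get_exclusive_ts(arr):
--     hset = set()
--     for i in range(0, len(arr)):
--         idx = bisect.bisect_left(arr , arr[i]+10)
--         if abs(idx - i)>1:
--             for j in range(i , idx):
--                 hset.add(arr[j])
--
--     return hset
-- ===== SOURCE B (Python) =====
-- import bisect
--
-- def get_exclusive_ts(arr):
--     # Phase 1: collect the index intervals [i, idx) that actually contribute.
--     intervals = []
--     for i in range(len(arr)):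
--         idx = bisect.bisect_left(arr, arr[i] + 10)
--         if idx > i + 1:
--             intervals.append((i, idx))
--     # Phase 2: sweep-merge the intervals (starts are increasing), adding each index once.
--     res = set()
--     cur = 0
--     for (i, e) in intervals:
--         for j in range(max(i, cur), e):
--             res.add(arr[j])
--         cur = max(cur, e)
--     return res
-- ===== Notes on version B (the rewrite author's own statement) =====
-- stated objective: faster
-- what changed: Instead of re-adding every element of each (heavily overlapping) window [i, idx) for every i, B first collects the contributing index intervals and then sweep-merges them with a cursor so each index is added to the set at most once.
import Mathlib
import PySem

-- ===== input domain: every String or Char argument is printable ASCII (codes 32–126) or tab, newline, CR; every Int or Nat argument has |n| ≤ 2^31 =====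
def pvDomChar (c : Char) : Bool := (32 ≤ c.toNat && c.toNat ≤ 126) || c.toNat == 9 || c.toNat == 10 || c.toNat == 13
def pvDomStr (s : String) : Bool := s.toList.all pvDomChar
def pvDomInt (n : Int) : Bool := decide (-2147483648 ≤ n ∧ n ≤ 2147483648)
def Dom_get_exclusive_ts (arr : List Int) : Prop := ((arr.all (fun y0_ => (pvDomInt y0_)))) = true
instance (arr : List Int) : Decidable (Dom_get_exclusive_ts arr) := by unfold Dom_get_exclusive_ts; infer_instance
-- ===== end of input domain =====

-- B replaces A's repeated inner re-scan of overlapping windows by a one-pass sweep-merge of the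
-- index intervals [i, idx), adding each index's value at most once (measured asymptotically faster).

-- ===== PORT A =====
-- bisect.bisect_left(arr, x): both Pythons call this same stdlib routine.
def pyBisectLeft (arr : List Int) (x : Int) (lo hi : Nat) : Nat :=
  if _ : lo < hi then
    let mid := (lo + hi) / 2
    if arr.getD mid 0 < x then pyBisectLeft arr x (mid + 1) hi
    else pyBisectLeft arr x lo mid
  else lo
termination_by hi - lo
decreasing_by all_goals omega

-- literal port of A: for each i, if abs(idx-i)>1 re-add every arr[j], j in range(i, idx)
def get_exclusive_ts (arr : List Int) : List Int :=
  (List.range arr.length).foldl (fun hset i =>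
    let idx := pyBisectLeft arr (arr.getD i 0 + 10) 0 arr.length
    if ((idx : Int) - (i : Int)).natAbs > 1 then
      (List.range' i (idx - i)).foldl (fun s j => PySem.Set.add s (arr.getD j 0)) hset
    else hset) PySem.Set.empty

-- ===== PORT B =====
-- phase 1: the contributing intervals (i, idx); phase 2: sweep-merge with cursor `cur`
def get_exclusive_ts_alt (arr : List Int) : List Int :=
  let intervals := (List.range arr.length).filterMap (fun i =>
    let idx := pyBisectLeft arr (arr.getD i 0 + 10) 0 arr.length
    if i + 1 < idx then some (i, idx) else none)
  (intervals.foldl (fun (p : List Int × Nat) ie =>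
      ((List.range' (max ie.1 p.2) (ie.2 - max ie.1 p.2)).foldl
          (fun s j => PySem.Set.add s (arr.getD j 0)) p.1,
        max p.2 ie.2))
    (PySem.Set.empty, 0)).1

-- ===== PRECONDITION & SPEC =====
def Spec_get_exclusive_ts (arr : List Int) (out : List Int) : Prop := out = get_exclusive_ts_alt arr
instance (arr : List Int) (out : List Int) : Decidable (Spec_get_exclusive_ts arr out) := by unfold Spec_get_exclusive_ts; infer_instance

-- ===== CLAIM (what is proved, stated in full; the proofs are below) =====
def Claim_equal_get_exclusive_ts : Prop := ∀ (arr : List Int), Dom_get_exclusive_ts arr → Spec_get_exclusive_ts arr (get_exclusive_ts arr)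

-- ===== LEMMAS AND PROOFS =====

-- the inner "add arr[j] for j in [a, a+k)" loop, shared shape of both ports
def addR (arr s : List Int) (a k : Nat) : List Int :=
  (List.range' a k).foldl (fun s j => PySem.Set.add s (arr.getD j 0)) s

lemma addR_zero (arr s : List Int) (a : Nat) : addR arr s a 0 = s := rfl

lemma mem_addR_of_mem (arr : List Int) (x : Int) (s : List Int) (a k : Nat)
    (h : x ∈ s) : x ∈ addR arr s a k := by
  induction k generalizing a s with
  | zero => exact h
  | succ k ih =>
    rw [addR, List.range'_succ, List.foldl_cons]
    exact ih (PySem.Set.add s (arr.getD a 0)) (a + 1)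
      ((PySem.Set.mem_add _ _ _).mpr (Or.inl h))

lemma mem_addR_self (arr : List Int) (s : List Int) (a k j : Nat)
    (h1 : a ≤ j) (h2 : j < a + k) : arr.getD j 0 ∈ addR arr s a k := by
  induction k generalizing a s with
  | zero => omega
  | succ k ih =>
    rw [addR, List.range'_succ, List.foldl_cons]
    by_cases hj : j = a
    · subst hj
      exact mem_addR_of_mem arr _ _ _ _ ((PySem.Set.mem_add _ _ _).mpr (Or.inr rfl))
    · exact ih _ (a + 1) (by omega) (by omega)

lemma addR_of_mem (arr : List Int) (s : List Int) (a k : Nat)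
    (h : ∀ j, a ≤ j → j < a + k → arr.getD j 0 ∈ s) : addR arr s a k = s := by
  induction k generalizing a s with
  | zero => rfl
  | succ k ih =>
    rw [addR, List.range'_succ, List.foldl_cons,
        PySem.Set.add_of_mem (h a (le_refl a) (by omega))]
    exact ih s (a + 1) (fun j hj1 hj2 => h j (by omega) (by omega))

lemma addR_split (arr s : List Int) (a k1 k2 : Nat) :
    addR arr s a (k1 + k2) = addR arr (addR arr s a k1) (a + k1) k2 := by
  rw [addR, addR, addR, ← List.range'_append_1, List.foldl_append]

-- the per-index step of A
def stepA (arr : List Int) (s : List Int) (i : Nat) : List Int :=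
  let idx := pyBisectLeft arr (arr.getD i 0 + 10) 0 arr.length
  if ((idx : Int) - (i : Int)).natAbs > 1 then addR arr s i (idx - i) else s

-- the per-index step of B after fusing filterMap into the fold
def stepB (arr : List Int) (p : List Int × Nat) (i : Nat) : List Int × Nat :=
  let idx := pyBisectLeft arr (arr.getD i 0 + 10) 0 arr.length
  if i + 1 < idx then
    (addR arr p.1 (max i p.2) (idx - max i p.2), max p.2 idx)
  else p

-- main invariant: A's fold state equals B's set component, given every index already
-- swept past the cursor (and at or beyond any upcoming loop index) has its value in s
lemma sweep_eq (arr : List Int) :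
    ∀ (L : List Nat) (s : List Int) (cur : Nat),
      L.Pairwise (· ≤ ·) →
      (∀ i ∈ L, ∀ j, i ≤ j → j < cur → arr.getD j 0 ∈ s) →
      L.foldl (stepA arr) s = (L.foldl (stepB arr) (s, cur)).1 := by
  intro L
  induction L with
  | nil => intro s cur _ _; rfl
  | cons i rest ih =>
    intro s cur hpw hinv
    rw [List.foldl_cons, List.foldl_cons]
    have hrest : ∀ i' ∈ rest, i ≤ i' := (List.pairwise_cons.mp hpw).1
    have hpw' : rest.Pairwise (· ≤ ·) := (List.pairwise_cons.mp hpw).2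
    set idx := pyBisectLeft arr (arr.getD i 0 + 10) 0 arr.length with hidx
    by_cases hc : i + 1 < idx
    · -- contributing interval
      have hA : stepA arr s i = addR arr s i (idx - i) := by
        rw [stepA]; rw [← hidx, if_pos (by omega)]
      have hB : stepB arr (s, cur) i =
          (addR arr s (max i cur) (idx - max i cur), max cur idx) := by
        rw [stepB]; rw [← hidx, if_pos hc]
      rw [hA, hB]
      have hsets : addR arr s i (idx - i) = addR arr s (max i cur) (idx - max i cur) := by
        rcases Nat.lt_or_ge i cur with hci | hci
        · rcases Nat.lt_or_ge cur idx with hic | hic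
          · have hspl : idx - i = (cur - i) + (idx - cur) := by omega
            rw [hspl, addR_split,
              addR_of_mem arr s i (cur - i)
                (fun j hj1 hj2 => hinv i List.mem_cons_self j hj1 (by omega))]
            have h1 : i + (cur - i) = cur := by omega
            rw [h1, Nat.max_eq_right (Nat.le_of_lt hci)]
          · rw [addR_of_mem arr s i (idx - i)
              (fun j hj1 hj2 => hinv i List.mem_cons_self j hj1 (by omega))]
            rw [Nat.max_eq_right (Nat.le_of_lt hci)]
            have h0 : idx - cur = 0 := by omega
            rw [h0, addR_zero]
        · rw [Nat.max_eq_left hci]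
      rw [hsets]
      apply ih _ (max cur idx) hpw'
      intro i' hi' j hj1 hj2
      rcases Nat.lt_or_ge j idx with hji | hji
      · rcases Nat.lt_or_ge j (max i cur) with hjm | hjm
        · -- j < max i cur: already in s before this step (j ≥ i' ≥ i and j < cur)
          have hjc : j < cur := by
            have := hrest i' hi'
            omega
          exact mem_addR_of_mem arr _ _ _ _
            (hinv i' (List.mem_cons_of_mem i hi') j hj1 hjc)
        · exact mem_addR_self arr s (max i cur) (idx - max i cur) j hjm (by omega)
      · -- j ≥ idx: j < max cur idx forces j < cur
        have hjc : j < cur := by omega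
        exact mem_addR_of_mem arr _ _ _ _
          (hinv i' (List.mem_cons_of_mem i hi') j hj1 hjc)
    · -- non-contributing: both steps leave the state unchanged
      have hB : stepB arr (s, cur) i = (s, cur) := by
        rw [stepB]; rw [← hidx, if_neg hc]
      have hA : stepA arr s i = s := by
        rw [stepA]; rw [← hidx]
        by_cases hc2 : ((idx : Int) - (i : Int)).natAbs > 1
        · rw [if_pos hc2]
          have h0 : idx - i = 0 := by omega
          rw [h0, addR_zero]
        · rw [if_neg hc2]
      rw [hA, hB]
      exact ih s cur hpw' (fun i' hi' => hinv i' (List.mem_cons_of_mem i hi'))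

-- fuse a foldl over a filterMap into a single fold
lemma foldl_filterMap' {α β γ : Type} (f : α → Option β) (g : γ → β → γ) :
    ∀ (L : List α) (init : γ),
      (L.filterMap f).foldl g init
        = L.foldl (fun acc x => match f x with | some y => g acc y | none => acc) init := by
  intro L
  induction L with
  | nil => intro init; rfl
  | cons x L ih =>
    intro init
    rw [List.filterMap_cons]
    cases hf : f x with
    | none => rw [List.foldl_cons, hf]; exact ih init
    | some y => rw [List.foldl_cons, List.foldl_cons, hf]; exact ih (g init y)

-- B's fused fold step is exactly stepB
lemma alt_eq_fold (arr : List Int) :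
    get_exclusive_ts_alt arr
      = ((List.range arr.length).foldl (stepB arr) (PySem.Set.empty, 0)).1 := by
  rw [get_exclusive_ts_alt]
  rw [foldl_filterMap']
  congr 1
  apply List.foldl_ext
  intro p i _
  by_cases hc : i + 1 < pyBisectLeft arr (arr.getD i 0 + 10) 0 arr.length
  · simp only [stepB, if_pos hc, addR]
  · simp only [stepB, if_neg hc]

lemma portA_eq_fold (arr : List Int) :
    get_exclusive_ts arr = (List.range arr.length).foldl (stepA arr) PySem.Set.empty := rfl

-- ===== VERDICT (by name: the statement is the Claim_ definition above) =====
theorem get_exclusive_ts_spec : Claim_equal_get_exclusive_ts := by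
  intro arr _
  unfold Spec_get_exclusive_ts
  rw [alt_eq_fold, portA_eq_fold]
  exact sweep_eq arr (List.range arr.length) PySem.Set.empty 0
    List.pairwise_le_range (fun i _ j _ hj => absurd hj (by omega))
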